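-- pv_equiv track=rewrite | github.com/AdityaProCoder/bis_rag | src/bis_parser.py | flatten_with_page_map
-- ===== SOURCE A (Python) =====
-- def flatten_with_page_map(pages: list[list[str]]) -> tuple[list[str], list[int]]:
--     all_lines: list[str] = []
--     line_pages: list[int] = []
--     for page_index, page_lines in enumerate(pages):
--         for line in page_lines:
--             all_lines.append(line)
--             line_pages.append(page_index)
--     return all_lines, line_pages
-- ===== SOURCE B (Python) =====
-- def _bisect_right(a: list[int], x: int) -> int:
--     lo, hi = 0, len(a)
--     while lo < hi:
--         mid = (lo + hi) // 2
--         if x < a[mid]: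
--             hi = mid
--         else:
--             lo = mid + 1
--     return lo
--
--
-- def flatten_with_page_map(pages: list[list[str]]) -> tuple[list[str], list[int]]:
--     all_lines = [line for page in pages for line in page]
--     offsets: list[int] = []
--     t = 0
--     for page in pages:
--         t += len(page)
--         offsets.append(t)
--     line_pages = [_bisect_right(offsets, j) for j in range(t)]
--     return all_lines, line_pages
-- ===== Notes on version B (the rewrite author's own statement) =====
-- stated objective: alternative
-- what changed: Instead of emitting page indices while flattening, B first builds a prefix-sum offset table of page lengths and then computes each line's page index by binary search (hand-rolled bisect_right) over that table.
import Mathlib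
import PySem

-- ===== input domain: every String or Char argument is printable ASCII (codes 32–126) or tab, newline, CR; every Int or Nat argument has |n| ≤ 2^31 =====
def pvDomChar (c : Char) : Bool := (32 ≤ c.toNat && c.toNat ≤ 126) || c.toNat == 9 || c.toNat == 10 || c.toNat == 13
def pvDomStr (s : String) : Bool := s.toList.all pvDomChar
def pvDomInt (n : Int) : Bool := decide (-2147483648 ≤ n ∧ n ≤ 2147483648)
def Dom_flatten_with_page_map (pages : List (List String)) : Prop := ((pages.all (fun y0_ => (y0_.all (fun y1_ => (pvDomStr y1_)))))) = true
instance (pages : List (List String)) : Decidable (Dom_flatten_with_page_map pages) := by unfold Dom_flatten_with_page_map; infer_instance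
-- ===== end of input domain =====

-- B replaces A's per-line page-index bookkeeping by a prefix-sum offset table of page
-- lengths plus a binary search (hand-rolled bisect_right) per line index (objective: alternative).

-- ===== PORT A =====
-- one interleaved loop: for each (page_index, page_lines), append every line and its page_index
def flatten_with_page_map (pages : List (List String)) : List String × List Int :=
  (PySem.List.enumerate pages).foldl
    (fun acc p =>
      p.2.foldl (fun acc2 line => (acc2.1 ++ [line], acc2.2 ++ [p.1])) acc)
    ([], [])

-- ===== PORT B =====
-- _bisect_right's while loop as recursion on lo/hi; in every call lo < hi ≤ a.length,
-- so 'a[mid]' is in range and 'a.getD mid 0' is exact for Python's a[mid]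
-- the while loop as structural recursion on a fuel counter; hi - lo shrinks by at least 1
-- per iteration, so fuel = a.length (≥ initial hi - lo) suffices and the guard never cuts it short
def pvBisectGo (a : List Int) (x : Int) (lo hi : Nat) : Nat → Nat
  | 0 => lo
  | fuel + 1 =>
    if lo < hi then
      -- mid = (lo + hi) // 2 inlined at its three uses
      if x < a.getD ((lo + hi) / 2) 0 then
        pvBisectGo a x lo ((lo + hi) / 2) fuel
      else
        pvBisectGo a x ((lo + hi) / 2 + 1) hi fuel
    else lo

def pvBisectRight (a : List Int) (x : Int) : Nat :=
  pvBisectGo a x 0 a.length a.length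

-- B: flatten by comprehension; prefix-sum offsets; binary search per line index
def flatten_with_page_map_alt (pages : List (List String)) : List String × List Int :=
  let all_lines := pages.flatten
  let st := pages.foldl
    (fun st page => (st.1 + (page.length : Int), st.2 ++ [st.1 + (page.length : Int)]))
    ((0 : Int), ([] : List Int))
  let line_pages := (PySem.List.pyRange 0 st.1 1).map (fun j => ((pvBisectRight st.2 j : Nat) : Int))
  (all_lines, line_pages)

-- ===== PRECONDITION & SPEC =====
def Spec_flatten_with_page_map (pages : List (List String)) (out : List String × List Int) : Prop := out = flatten_with_page_map_alt pages
instance (pages : List (List String)) (out : List String × List Int) : Decidable (Spec_flatten_with_page_map pages out) := by unfold Spec_flatten_with_page_map; infer_instance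

-- ===== CLAIM (what is proved, stated in full; the proofs are below) =====
def Claim_equal_flatten_with_page_map : Prop := ∀ (pages : List (List String)), Dom_flatten_with_page_map pages → Spec_flatten_with_page_map pages (flatten_with_page_map pages)

-- ===== LEMMAS AND PROOFS =====

-- total number of lines
def pvTot : List (List String) → Int
  | [] => 0
  | pg :: rest => (pg.length : Int) + pvTot rest

-- prefix-sum offsets starting from base c
def pvOffs (c : Int) : List (List String) → List Int
  | [] => []
  | pg :: rest => (c + (pg.length : Int)) :: pvOffs (c + (pg.length : Int)) rest

-- reference page map: replicate each page's index
def pvRef (s : Int) : List (List String) → List Int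
  | [] => []
  | pg :: rest => List.replicate pg.length s ++ pvRef (s + 1) rest

-- page index of line j, pages laid out from base offset c
def pvPageOf (c : Int) : List (List String) → Int → Nat
  | [], _ => 0
  | pg :: rest, j => if j < c + (pg.length : Int) then 0 else pvPageOf (c + (pg.length : Int)) rest j + 1

-- the canonical bisect_right postcondition
def pvGood (a : List Int) (x : Int) (r : Nat) : Prop :=
  r ≤ a.length ∧ (∀ i, i < r → a.getD i 0 ≤ x) ∧ (∀ i, r ≤ i → i < a.length → x < a.getD i 0)

lemma pvTot_nonneg (pages : List (List String)) : 0 ≤ pvTot pages := by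
  induction pages with
  | nil => simp [pvTot]
  | cons pg rest ih => simp only [pvTot]; positivity

lemma pvOffs_lb (c : Int) (pages : List (List String)) : ∀ e ∈ pvOffs c pages, c ≤ e := by
  induction pages generalizing c with
  | nil => simp [pvOffs]
  | cons pg rest ih =>
      intro e he
      simp only [pvOffs, List.mem_cons] at he
      rcases he with h | h
      · omega
      · have := ih (c + (pg.length : Int)) e h; omega

lemma pvOffs_sorted (c : Int) (pages : List (List String)) :
    (pvOffs c pages).Pairwise (· ≤ ·) := by
  induction pages generalizing c with
  | nil => simp [pvOffs]
  | cons pg rest ih =>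
      simp only [pvOffs, List.pairwise_cons]
      exact ⟨fun e he => pvOffs_lb _ _ e he, ih _⟩

lemma sorted_getD_mono (a : List Int) (h : a.Pairwise (· ≤ ·)) (i j : Nat)
    (hij : i ≤ j) (hj : j < a.length) : a.getD i 0 ≤ a.getD j 0 := by
  rcases eq_or_lt_of_le hij with rfl | hlt
  · exact le_refl _
  · rw [List.getD_eq_getElem a 0 (by omega), List.getD_eq_getElem a 0 hj]
    exact List.pairwise_iff_getElem.mp h i j (by omega) hj hlt

lemma pvBisectGo_good (a : List Int) (hs : a.Pairwise (· ≤ ·)) (x : Int) :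
    ∀ (fuel lo hi : Nat), hi - lo ≤ fuel → lo ≤ hi → hi ≤ a.length →
    (∀ i, i < lo → a.getD i 0 ≤ x) → (∀ i, hi ≤ i → i < a.length → x < a.getD i 0) →
    pvGood a x (pvBisectGo a x lo hi fuel) := by
  intro fuel
  induction fuel with
  | zero =>
      intro lo hi hf hle hhi hlow hhigh
      simp only [pvBisectGo]
      exact ⟨by omega, hlow, fun i hi' hil => hhigh i (by omega) hil⟩
  | succ fuel ih =>
      intro lo hi hf hle hhi hlow hhigh
      simp only [pvBisectGo]
      by_cases h : lo < hi
      · rw [if_pos h]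
        by_cases hx : x < a.getD ((lo + hi) / 2) 0
        · rw [if_pos hx]
          exact ih lo ((lo + hi) / 2) (by omega) (by omega) (by omega) hlow
            (fun i hmi hil => lt_of_lt_of_le hx (sorted_getD_mono a hs ((lo + hi) / 2) i hmi hil))
        · rw [if_neg hx]
          refine ih ((lo + hi) / 2 + 1) hi (by omega) (by omega) hhi (fun i hi' => ?_) hhigh
          have : a.getD i 0 ≤ a.getD ((lo + hi) / 2) 0 :=
            sorted_getD_mono a hs i ((lo + hi) / 2) (by omega) (by omega)
          omega
      · rw [if_neg h]
        exact ⟨by omega, hlow, fun i hi' hil => hhigh i (by omega) hil⟩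

lemma pvGood_unique (a : List Int) (x : Int) (r r' : Nat)
    (h : pvGood a x r) (h' : pvGood a x r') : r = r' := by
  obtain ⟨hl, h1, h2⟩ := h
  obtain ⟨hl', h1', h2'⟩ := h'
  rcases lt_trichotomy r r' with hlt | heq | hgt
  · have := h1' r hlt; have := h2 r (le_refl _) (by omega); omega
  · exact heq
  · have := h1 r' hgt; have := h2' r' (le_refl _) (by omega); omega

lemma pvPageOf_good (pages : List (List String)) : ∀ (c j : Int), c ≤ j → j < c + pvTot pages →
    pvGood (pvOffs c pages) j (pvPageOf c pages j) := by
  induction pages with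
  | nil => intro c j h1 h2; simp [pvTot] at h2; omega
  | cons pg rest ih =>
      intro c j h1 h2
      by_cases hj : j < c + (pg.length : Int)
      · simp only [pvPageOf, pvOffs, hj, ↓reduceIte]
        refine ⟨by simp, by omega, fun i _ hil => ?_⟩
        have hmem : ((c + (pg.length : Int)) :: pvOffs (c + (pg.length : Int)) rest).getD i 0
            ∈ (c + (pg.length : Int)) :: pvOffs (c + (pg.length : Int)) rest := by
          rw [List.getD_eq_getElem _ 0 hil]; exact List.getElem_mem _
        rcases List.mem_cons.mp hmem with he | he
        · omega
        · have := pvOffs_lb (c + (pg.length : Int)) rest _ he; omega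
      · simp only [pvPageOf, pvOffs, hj, ↓reduceIte]
        have hrec := ih (c + (pg.length : Int)) j (by omega) (by simp only [pvTot] at h2; omega)
        obtain ⟨hl, h1', h2'⟩ := hrec
        refine ⟨by simpa using Nat.succ_le_succ hl, fun i hi' => ?_, fun i hi1 hi2 => ?_⟩
        · cases i with
          | zero => simpa using (by omega : ¬ j < c + (pg.length : Int)) |> fun h => by simp at hj ⊢; omega
          | succ i' => simpa using h1' i' (by omega)
        · cases i with
          | zero => omega
          | succ i' => simpa using h2' i' (by omega) (by simpa using hi2)

lemma pvFoldl_offs (pages : List (List String)) : ∀ (c : Int) (acc : List Int),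
    pages.foldl
      (fun st page => (st.1 + (page.length : Int), st.2 ++ [st.1 + (page.length : Int)]))
      (c, acc)
    = (c + pvTot pages, acc ++ pvOffs c pages) := by
  induction pages with
  | nil => intro c acc; simp [pvTot, pvOffs]
  | cons pg rest ih =>
      intro c acc
      simp only [List.foldl_cons, ih, pvTot, pvOffs, Prod.mk.injEq]
      exact ⟨by omega, by simp⟩

lemma pvMapPage (pages : List (List String)) : ∀ (c s : Int),
    (PySem.List.pyRange c (c + pvTot pages) 1).map (fun j => s + (pvPageOf c pages j : Int))
      = pvRef s pages := by
  induction pages with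
  | nil => intro c s; simp [pvTot, pvRef, PySem.List.pyRange_one_eq_nil]
  | cons pg rest ih =>
      intro c s
      have h1 : c ≤ c + (pg.length : Int) := by omega
      have h2 : c + (pg.length : Int) ≤ c + pvTot (pg :: rest) := by
        have := pvTot_nonneg rest; simp only [pvTot]; omega
      rw [PySem.List.pyRange_one_append c (c + (pg.length : Int)) _ h1 h2, List.map_append]
      have hfst : (PySem.List.pyRange c (c + (pg.length : Int)) 1).map
          (fun j => s + (pvPageOf c (pg :: rest) j : Int)) = List.replicate pg.length s := by
        rw [List.map_congr_left (fun j hj => ?_), List.map_const']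
        · rw [PySem.List.length_pyRange_one]
          congr 1; omega
        · have := (PySem.List.mem_pyRange_one).mp hj
          simp only [pvPageOf, show j < c + (pg.length : Int) by omega, ↓reduceIte,
            Nat.cast_zero, add_zero]
      have hsnd : (PySem.List.pyRange (c + (pg.length : Int)) (c + pvTot (pg :: rest)) 1).map
          (fun j => s + (pvPageOf c (pg :: rest) j : Int)) = pvRef (s + 1) rest := by
        have harg : c + pvTot (pg :: rest) = (c + (pg.length : Int)) + pvTot rest := by
          simp only [pvTot]; omega
        rw [harg, List.map_congr_left (fun j hj => ?_), ih (c + (pg.length : Int)) (s + 1)]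
        have := (PySem.List.mem_pyRange_one).mp hj
        simp only [pvPageOf, show ¬ j < c + (pg.length : Int) by omega, ↓reduceIte]
        push_cast; ring
      rw [hfst, hsnd]; rfl

-- A's inner loop appends the page's lines and replicates its index
lemma pvInnerA (ls : List String) (i : Int) (a : List String) (b : List Int) :
    ls.foldl (fun acc2 line => (acc2.1 ++ [line], acc2.2 ++ [i])) (a, b)
      = (a ++ ls, b ++ List.replicate ls.length i) := by
  induction ls generalizing a b with
  | nil => simp
  | cons x xs ih =>
      simp only [List.foldl_cons, ih, List.length_cons]
      simp [List.replicate_succ]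

-- A's outer loop from an arbitrary accumulator and start index
lemma pvOuterA (pages : List (List String)) : ∀ (s : Int) (a : List String) (b : List Int),
    (PySem.List.enumerate pages s).foldl
        (fun acc p => p.2.foldl (fun acc2 line => (acc2.1 ++ [line], acc2.2 ++ [p.1])) acc)
        (a, b)
      = (a ++ pages.flatten, b ++ pvRef s pages) := by
  induction pages with
  | nil => intro s a b; simp [PySem.List.enumerate_nil, pvRef]
  | cons pg rest ih =>
      intro s a b
      rw [PySem.List.enumerate_cons]
      simp only [List.foldl_cons, pvInnerA, ih, pvRef]
      simp

lemma pvAltEq (pages : List (List String)) :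
    flatten_with_page_map_alt pages = (pages.flatten, pvRef 0 pages) := by
  unfold flatten_with_page_map_alt
  rw [pvFoldl_offs pages 0 []]
  simp only [zero_add, List.nil_append]
  congr 1
  have hcong : (PySem.List.pyRange 0 (pvTot pages) 1).map
      (fun j => ((pvBisectRight (pvOffs 0 pages) j : Nat) : Int))
      = (PySem.List.pyRange 0 (0 + pvTot pages) 1).map
      (fun j => 0 + (pvPageOf 0 pages j : Int)) := by
    rw [show (0 : Int) + pvTot pages = pvTot pages by ring]
    refine List.map_congr_left (fun j hj => ?_)
    have hb := (PySem.List.mem_pyRange_one).mp hj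
    have hgood1 : pvGood (pvOffs 0 pages) j (pvBisectRight (pvOffs 0 pages) j) := by
      unfold pvBisectRight
      exact pvBisectGo_good _ (pvOffs_sorted 0 pages) j _ 0 _ (by omega) (by omega) (le_refl _)
        (by omega) (by omega)
    have hgood2 : pvGood (pvOffs 0 pages) j (pvPageOf 0 pages j) :=
      pvPageOf_good pages 0 j (by omega) (by omega)
    rw [pvGood_unique _ _ _ _ hgood1 hgood2]
    omega
  rw [hcong, pvMapPage pages 0 0]

-- ===== VERDICT (by name: the statement is the Claim_ definition above) =====
theorem flatten_with_page_map_spec : Claim_equal_flatten_with_page_map := by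
  intro pages _
  show _ = _
  rw [pvAltEq]
  unfold flatten_with_page_map
  rw [pvOuterA pages 0 [] []]
  simp
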